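-- pv_equiv track=rewrite | github.com/varsharagi/python | Dir.py | can_save_peter
-- ===== SOURCE A (Python) =====
-- def can_save_peter(instructions: str) -> bool:
--     direction = 'N'
--
--     for instruction in instructions:
--         if direction == 'N':
--             if instruction == 'L':
--                 direction = 'W'
--             elif instruction == 'R':
--                 direction = 'E'
--         elif direction == 'E':
--             if instruction == 'L':
--                 direction = 'N'
--             elif instruction == 'R':
--                 direction = 'S'
--         elif direction == 'S':
--             return True
--         elif direction == 'W':
--             if instruction == 'L':
--                 direction = 'S'
--             elif instruction == 'R':
--                 direction = 'N'
--     return False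
-- ===== SOURCE B (Python) =====
-- def can_save_peter(instructions: str) -> bool:
--     # Prefix-sum formulation: headings[i] is the net rotation count after the
--     # first i instructions (N=0, E=1, S=2, W=3 mod 4).  A turns out to return
--     # True iff the walker faces South before consuming some instruction, i.e.
--     # iff some prefix strictly shorter than the whole string has heading 2 mod 4.
--     headings = [0]
--     for c in instructions:
--         headings.append(headings[-1] + (1 if c == 'R' else -1 if c == 'L' else 0))
--     return any(h % 4 == 2 for h in headings[:-1])
-- ===== Notes on version B (the rewrite author's own statement) =====
-- stated objective: alternative
-- what changed: Replaces the early-returning direction automaton by two staged passes: a prefix-sum pass that materialises every intermediate heading count, then a declarative any() over all proper prefixes testing heading mod 4 == 2 (South).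
import Mathlib
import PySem

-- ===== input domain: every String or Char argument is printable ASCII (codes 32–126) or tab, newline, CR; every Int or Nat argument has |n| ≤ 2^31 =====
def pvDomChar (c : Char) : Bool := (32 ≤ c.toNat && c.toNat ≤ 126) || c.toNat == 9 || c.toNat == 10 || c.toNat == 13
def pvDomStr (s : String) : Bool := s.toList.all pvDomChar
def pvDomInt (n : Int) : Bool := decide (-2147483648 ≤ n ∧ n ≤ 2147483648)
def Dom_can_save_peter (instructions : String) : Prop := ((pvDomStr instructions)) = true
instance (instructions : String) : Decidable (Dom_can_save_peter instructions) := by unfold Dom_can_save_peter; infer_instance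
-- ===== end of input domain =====

-- B replaces A's early-returning direction automaton by a prefix-sum pass plus a declarative
-- 'any proper prefix heading is South' test (alternative decomposition, same cost).

-- ===== PORT A =====
-- the for-loop over the characters with the string-valued `direction` state
def canSavePeterLoopA : List Char → String → Bool
  | [], _ => false
  | c :: rest, direction =>
    if direction == "N" then
      canSavePeterLoopA rest (if c == 'L' then "W" else if c == 'R' then "E" else direction)
    else if direction == "E" then
      canSavePeterLoopA rest (if c == 'L' then "N" else if c == 'R' then "S" else direction)
    else if direction == "S" then
      true
    else if direction == "W" then
      canSavePeterLoopA rest (if c == 'L' then "S" else if c == 'R' then "N" else direction)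
    else
      canSavePeterLoopA rest direction

def can_save_peter (instructions : String) : Bool :=
  canSavePeterLoopA instructions.toList "N"

-- ===== PORT B =====
-- first pass: build headings = [0, h1, ..., hn] (each element is previous + delta of the char)
def canSavePeterHeadings : List Char → Int → List Int
  | [], h => [h]
  | c :: rest, h =>
    h :: canSavePeterHeadings rest (h + (if c == 'R' then 1 else if c == 'L' then -1 else 0))

def can_save_peter_alt (instructions : String) : Bool :=
  -- headings[:-1] is dropLast (the headings list is always nonempty); `any` ports Python's any()
  ((canSavePeterHeadings instructions.toList 0).dropLast).any
    (fun h => PySem.Int.mod h 4 == 2)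

-- ===== PRECONDITION & SPEC =====
def Spec_can_save_peter (instructions : String) (out : Bool) : Prop := out = can_save_peter_alt instructions
instance (instructions : String) (out : Bool) : Decidable (Spec_can_save_peter instructions out) := by unfold Spec_can_save_peter; infer_instance

-- ===== CLAIM (what is proved, stated in full; the proofs are below) =====
def Claim_equal_can_save_peter : Prop := ∀ (instructions : String), Dom_can_save_peter instructions → Spec_can_save_peter instructions (can_save_peter instructions)

-- ===== LEMMAS AND PROOFS =====

-- the string direction corresponding to a rotation count mod 4
def pvDirOf (m : Int) : String :=
  if m == 0 then "N" else if m == 1 then "E" else if m == 2 then "S" else "W"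

lemma pvHeadings_ne_nil (cs : List Char) (k : Int) : canSavePeterHeadings cs k ≠ [] := by
  cases cs <;> simp [canSavePeterHeadings]

lemma pvLoop_eq : ∀ (cs : List Char) (k : Int),
    canSavePeterLoopA cs (pvDirOf (PySem.Int.mod k 4)) =
      ((canSavePeterHeadings cs k).dropLast).any (fun h => PySem.Int.mod h 4 == 2) := by
  intro cs
  induction cs with
  | nil => intro k; simp [canSavePeterLoopA, canSavePeterHeadings]
  | cons c rest ih =>
    intro k
    have hme : ∀ a : Int, PySem.Int.mod a 4 = a % 4 := fun a =>
      PySem.Int.mod_eq_emod_of_pos (by norm_num)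
    -- unfold one step of the headings list
    have hcons : canSavePeterHeadings (c :: rest) k
        = k :: canSavePeterHeadings rest (k + (if c == 'R' then 1 else if c == 'L' then -1 else 0)) := rfl
    set k' := k + (if c == 'R' then 1 else if c == 'L' then -1 else 0) with hk'
    have hdl : (canSavePeterHeadings (c :: rest) k).dropLast
        = k :: (canSavePeterHeadings rest k').dropLast := by
      rw [hcons, List.dropLast_cons_of_ne_nil (pvHeadings_ne_nil rest k')]
    have hany : ((canSavePeterHeadings (c :: rest) k).dropLast).any
          (fun h => PySem.Int.mod h 4 == 2)
        = ((PySem.Int.mod k 4 == 2) ||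
            ((canSavePeterHeadings rest k').dropLast).any (fun h => PySem.Int.mod h 4 == 2)) := by
      rw [hdl]; simp
    rw [hany, ← ih k']
    have hm : k % 4 = 0 ∨ k % 4 = 1 ∨ k % 4 = 2 ∨ k % 4 = 3 := by omega
    rcases hm with h | h | h | h
    · by_cases hL : c = 'L'
      · have hx : k' % 4 = 3 := by simp [hk', hL]; omega
        simp [canSavePeterLoopA, pvDirOf, hme, h, hx, hL]
      · by_cases hR : c = 'R'
        · have hx : k' % 4 = 1 := by simp [hk', hR]; omega
          simp [canSavePeterLoopA, pvDirOf, hme, h, hx, hR]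
        · have hx : k' % 4 = 0 := by simp [hk', hL, hR]; omega
          simp [canSavePeterLoopA, pvDirOf, hme, h, hx, hL, hR]
    · by_cases hL : c = 'L'
      · have hx : k' % 4 = 0 := by simp [hk', hL]; omega
        simp [canSavePeterLoopA, pvDirOf, hme, h, hx, hL]
      · by_cases hR : c = 'R'
        · have hx : k' % 4 = 2 := by simp [hk', hR]; omega
          simp [canSavePeterLoopA, pvDirOf, hme, h, hx, hR]
        · have hx : k' % 4 = 1 := by simp [hk', hL, hR]; omega
          simp [canSavePeterLoopA, pvDirOf, hme, h, hx, hL, hR]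
    · simp [canSavePeterLoopA, pvDirOf, hme, h]
    · by_cases hL : c = 'L'
      · have hx : k' % 4 = 2 := by simp [hk', hL]; omega
        simp [canSavePeterLoopA, pvDirOf, hme, h, hx, hL]
      · by_cases hR : c = 'R'
        · have hx : k' % 4 = 0 := by simp [hk', hR]; omega
          simp [canSavePeterLoopA, pvDirOf, hme, h, hx, hR]
        · have hx : k' % 4 = 3 := by simp [hk', hL, hR]; omega
          simp [canSavePeterLoopA, pvDirOf, hme, h, hx, hL, hR]

-- ===== VERDICT (by name: the statement is the Claim_ definition above) =====
theorem can_save_peter_spec : Claim_equal_can_save_peter := by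
  intro s _
  unfold Spec_can_save_peter can_save_peter can_save_peter_alt
  have h := pvLoop_eq s.toList 0
  have h0 : PySem.Int.mod 0 4 = 0 := by decide
  rw [h0] at h
  exact h
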